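-- pv_equiv track=rewrite | github.com/Sharath0313/SAT_Solver | sat_solver.py | min_clauses
-- ===== SOURCE A (Python) =====
-- def min_clauses(clauses):
-- 	MinClauses = []
-- 	size = -1
--
-- 	for clause in clauses:
--
-- 		clause_size = len(clause)
--
-- 		if size == -1 or clause_size < size:
-- 			MinClauses = [clause]
-- 			size = clause_size
--
-- 		elif clause_size == size:
-- 			MinClauses.append(clause)
--
-- 	return MinClauses
-- ===== SOURCE B (Python) =====
-- def min_clauses(clauses):
--     if not clauses:
--         return []
--     m = min(len(c) for c in clauses)
--     return [c for c in clauses if len(c) == m]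
-- ===== Notes on version B (the rewrite author's own statement) =====
-- stated objective: idiomatic
-- what changed: Replaced A's one-pass running-minimum bookkeeping (reset list / append, sentinel size = -1) by a two-pass min-then-filter: compute the minimum clause length, then keep the clauses of that length, with an explicit empty-input guard.
import Mathlib
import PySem

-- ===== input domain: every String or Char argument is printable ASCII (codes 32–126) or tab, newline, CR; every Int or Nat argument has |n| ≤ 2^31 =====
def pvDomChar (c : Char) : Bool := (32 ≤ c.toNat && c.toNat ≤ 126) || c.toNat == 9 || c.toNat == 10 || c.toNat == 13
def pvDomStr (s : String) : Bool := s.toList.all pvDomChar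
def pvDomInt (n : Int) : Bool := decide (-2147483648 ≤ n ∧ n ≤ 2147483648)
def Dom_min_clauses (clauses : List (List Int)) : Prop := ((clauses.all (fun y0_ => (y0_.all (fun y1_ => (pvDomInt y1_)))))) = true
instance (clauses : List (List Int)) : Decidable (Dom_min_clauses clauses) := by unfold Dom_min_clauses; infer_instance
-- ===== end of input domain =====

-- B replaces A's one-pass running-minimum bookkeeping by an idiomatic two-pass
-- min-then-filter; equal on all inputs.

-- ===== PORT A =====
-- state: (MinClauses, size); the loop body in A's branch order
def min_clauses (clauses : List (List Int)) : List (List Int) :=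
  (clauses.foldl
    (fun (st : List (List Int) × Int) clause =>
      let clause_size : Int := clause.length
      if st.2 = -1 ∨ clause_size < st.2 then ([clause], clause_size)
      else if clause_size = st.2 then (st.1 ++ [clause], st.2)
      else st)
    ([], -1)).1

-- ===== PORT B =====
-- 'min(len(c) for c in clauses)' ported as a fold of 'min' over the lengths
def min_clauses_alt (clauses : List (List Int)) : List (List Int) :=
  match clauses with
  | [] => []
  | c :: t =>
    let m : Int := t.foldl (fun a d => min a (d.length : Int)) (c.length : Int)
    (c :: t).filter (fun d => (d.length : Int) = m)

-- ===== PRECONDITION & SPEC =====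
def Spec_min_clauses (clauses : List (List Int)) (out : List (List Int)) : Prop := out = min_clauses_alt clauses
instance (clauses : List (List Int)) (out : List (List Int)) : Decidable (Spec_min_clauses clauses out) := by unfold Spec_min_clauses; infer_instance

-- ===== CLAIM (what is proved, stated in full; the proofs are below) =====
def Claim_equal_min_clauses : Prop := ∀ (clauses : List (List Int)), Dom_min_clauses clauses → Spec_min_clauses clauses (min_clauses clauses)

-- ===== LEMMAS AND PROOFS =====

-- the fold of 'min' over lengths never exceeds its starting value
theorem foldMin_le (t : List (List Int)) (s : Int) :
    t.foldl (fun a d => min a (d.length : Int)) s ≤ s := by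
  induction t generalizing s with
  | nil => simp
  | cons d t ih =>
    simp only [List.foldl_cons]
    exact le_trans (ih _) (min_le_left _ _)

-- the loop invariant of A's fold, for a non-negative running size
theorem min_clauses_loop (l : List (List Int)) (acc : List (List Int)) (s : Int)
    (hs : 0 ≤ s) :
    l.foldl
      (fun (st : List (List Int) × Int) clause =>
        let clause_size : Int := clause.length
        if st.2 = -1 ∨ clause_size < st.2 then ([clause], clause_size)
        else if clause_size = st.2 then (st.1 ++ [clause], st.2)
        else st)
      (acc, s)
    = ((if l.foldl (fun a d => min a (d.length : Int)) s = s then acc else []) ++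
        l.filter (fun d => (d.length : Int) = l.foldl (fun a d => min a (d.length : Int)) s),
       l.foldl (fun a d => min a (d.length : Int)) s) := by
  induction l generalizing acc s with
  | nil => simp
  | cons c t ih =>
    have hm : t.foldl (fun a d => min a (d.length : Int)) (min s c.length) ≤ min s (c.length : Int) :=
      foldMin_le t _
    rcases lt_trichotomy ((c.length : Int)) s with h | h | h
    · simp only [List.foldl_cons, List.filter_cons]
      rw [if_pos (Or.inr h)]
      rw [ih [c] c.length (Int.natCast_nonneg _)]
      have hmin : min s (c.length : Int) = c.length := by omega
      rw [hmin] at hm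
      have hms : ¬ t.foldl (fun a d => min a (d.length : Int)) ((c.length : Int)) = s := by
        omega
      simp only [hmin, if_neg hms]
      set m := t.foldl (fun a d => min a (d.length : Int)) (c.length : Int) with hmdef
      by_cases hc : (c.length : Int) = m
      · simp [← hc]
      · simp [hc, Ne.symm hc]
    · simp only [List.foldl_cons, List.filter_cons]
      rw [if_neg (by omega), if_pos h]
      rw [ih (acc ++ [c]) s hs]
      have hmin : min s (c.length : Int) = s := by omega
      simp only [hmin]
      set m := t.foldl (fun a d => min a (d.length : Int)) s with hmdef
      by_cases hms : m = s
      · simp [hms, ← h]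
      · have hcne : ¬ (c.length : Int) = m := by rw [h]; exact fun hh => hms hh.symm
        simp [hms, hcne]
    · simp only [List.foldl_cons, List.filter_cons]
      rw [if_neg (by omega), if_neg (by omega)]
      rw [ih acc s hs]
      have hmin : min s (c.length : Int) = s := by omega
      simp only [hmin] at hm ⊢
      have hcne : ¬ (c.length : Int) = t.foldl (fun a d => min a (d.length : Int)) s := by
        intro hh; omega
      simp [hcne]

-- ===== VERDICT (by name: the statement is the Claim_ definition above) =====
theorem min_clauses_spec : Claim_equal_min_clauses := by
  intro clauses _
  unfold Spec_min_clauses min_clauses min_clauses_alt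
  match clauses with
  | [] => rfl
  | c :: t =>
    show (t.foldl
        (fun (st : List (List Int) × Int) clause =>
          let clause_size : Int := clause.length
          if st.2 = -1 ∨ clause_size < st.2 then ([clause], clause_size)
          else if clause_size = st.2 then (st.1 ++ [clause], st.2)
          else st)
        ([c], (c.length : Int))).1
      = (c :: t).filter
          (fun d => (d.length : Int) = t.foldl (fun a d => min a (d.length : Int)) (c.length : Int))
    rw [min_clauses_loop t [c] c.length (Int.natCast_nonneg _)]
    set m := t.foldl (fun a d => min a (d.length : Int)) (c.length : Int) with hmdef
    simp only [List.filter_cons]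
    by_cases hc : (c.length : Int) = m
    · simp [← hc]
    · simp [hc, Ne.symm hc]
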